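-- pv_equiv track=rewrite | github.com/althaf1504/AILabCS659 | 3_Jugs_Problem.py | bfs
-- ===== SOURCE A (Python) =====
-- from collections import deque
--
-- def is_valid(state):
--     jug1, jug2, jug3 = state
--     # Check jug capacity limits and non-negative amounts
--     if jug1 > 8 or jug2 > 5 or jug3 > 3 or jug1 < 0 or jug2 < 0 or jug3 < 0:
--         return False
--     return True
--
-- def get_successors(state):
--     successors = []
--     jug1, jug2, jug3 = state
--     capacities = (8, 5, 3)
--
--     # All possible pour moves: (from_jug, to_jug)
--     moves = [(0, 1), (0, 2), (1, 0), (1, 2), (2, 0), (2, 1)]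
--     for move in moves:
--         amounts = [jug1, jug2, jug3]
--         i, j = move
--         pour_amount = min(amounts[i], capacities[j] - amounts[j])
--         if pour_amount > 0:
--             amounts[i] -= pour_amount
--             amounts[j] += pour_amount
--             new_state = tuple(amounts)
--             if is_valid(new_state):
--                 successors.append(new_state)
--     return successors
--
-- def check_goal_state(state):
--     return state == goal_state
--
-- def bfs(start_state, goal_state):
--     queue = deque([(start_state, [])])
--     visited = set()
--     while queue:
--         (state, path) = queue.popleft()  # BFS uses popleft
--         if state in visited:
--             continue
--         visited.add(state)
--         path = path + [state]
--         if check_goal_state(state):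
--             return path
--         for successor in get_successors(state):
--             queue.append((successor, path))
--     return None
--
-- goal_state = (1, 4, 3)  # target state
-- ===== SOURCE B (Python) =====
-- from collections import deque
--
-- goal_state = (1, 4, 3)  # module-level target, as in the original module
--
--
-- def is_valid(state):
--     jug1, jug2, jug3 = state
--     if jug1 > 8 or jug2 > 5 or jug3 > 3 or jug1 < 0 or jug2 < 0 or jug3 < 0:
--         return False
--     return True
--
--
-- def get_successors(state):
--     successors = []
--     jug1, jug2, jug3 = state
--     capacities = (8, 5, 3)
--     moves = [(0, 1), (0, 2), (1, 0), (1, 2), (2, 0), (2, 1)]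
--     for move in moves:
--         amounts = [jug1, jug2, jug3]
--         i, j = move
--         pour_amount = min(amounts[i], capacities[j] - amounts[j])
--         if pour_amount > 0:
--             amounts[i] -= pour_amount
--             amounts[j] += pour_amount
--             new_state = tuple(amounts)
--             if is_valid(new_state):
--                 successors.append(new_state)
--     return successors
--
--
-- def check_goal_state(state):
--     return state == goal_state
--
--
-- def bfs(start_state, goal_state):
--     # Parent-pointer BFS: queue of bare states + parent dict, path rebuilt once
--     # at the goal instead of a copied path carried with every queue entry.
--     queue = deque([start_state])
--     visited = set()
--     parent = {start_state: None}
--     while queue: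
--         state = queue.popleft()
--         if state in visited:
--             continue
--         visited.add(state)
--         if check_goal_state(state):
--             path = []
--             cur = state
--             while cur is not None:
--                 path.append(cur)
--                 cur = parent.get(cur)
--             path.reverse()
--             return path
--         for succ in get_successors(state):
--             if succ not in parent:
--                 parent[succ] = state
--             queue.append(succ)
--     return None
-- ===== Notes on version B (the rewrite author's own statement) =====
-- stated objective: alternative
-- what changed: Replaces A's BFS queue of (state, path) pairs with a full path copied on every enqueue by a parent-pointer BFS: the queue holds bare states, a parent dict records each state's predecessor at first discovery, and the path is reconstructed once by following parent pointers when the goal (the module-level constant (1,4,3), which both implementations test instead of the goal_state parameter) is dequeued.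
import Mathlib
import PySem

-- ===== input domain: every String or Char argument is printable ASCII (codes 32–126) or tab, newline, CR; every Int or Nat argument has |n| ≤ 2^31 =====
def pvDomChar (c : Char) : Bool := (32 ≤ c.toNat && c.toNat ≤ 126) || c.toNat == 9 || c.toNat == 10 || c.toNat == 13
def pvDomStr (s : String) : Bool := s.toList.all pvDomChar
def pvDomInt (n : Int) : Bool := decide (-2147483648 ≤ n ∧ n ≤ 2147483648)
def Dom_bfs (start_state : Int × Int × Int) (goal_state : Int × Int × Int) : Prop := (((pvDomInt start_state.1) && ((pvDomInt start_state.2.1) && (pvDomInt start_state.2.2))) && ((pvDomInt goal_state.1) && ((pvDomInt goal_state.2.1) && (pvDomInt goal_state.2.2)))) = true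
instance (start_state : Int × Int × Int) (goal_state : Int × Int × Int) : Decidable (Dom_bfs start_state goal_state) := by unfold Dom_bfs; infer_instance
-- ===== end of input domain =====

-- B replaces A's path-carrying BFS queue by a parent-pointer BFS (bare-state queue + parent
-- dict + one path reconstruction at the goal); like A, the goal test uses the module-level
-- constant (1, 4, 3), not the goal_state parameter. Objective: alternative.

abbrev JState : Type := Int × Int × Int

-- ===== PORT A =====
def isValid (state : JState) : Bool :=
  -- jug1, jug2, jug3 = state
  if state.1 > 8 || state.2.1 > 5 || state.2.2 > 3 || state.1 < 0 || state.2.1 < 0 || state.2.2 < 0 then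
    false
  else true

-- amounts[i] / amounts[j]: i, j come from the literal `moves` list, always 0/1/2 and in range,
-- so List.getD / List.set are exact for Python's list indexing and assignment here.
def getSuccessors (state : JState) : List JState :=
  let capacities : List Int := [8, 5, 3]
  let moves : List (Nat × Nat) := [(0, 1), (0, 2), (1, 0), (1, 2), (2, 0), (2, 1)]
  moves.foldl (fun successors move =>
    let amounts : List Int := [state.1, state.2.1, state.2.2]
    let i := move.1
    let j := move.2
    let pour_amount := min (amounts.getD i 0) (capacities.getD j 0 - amounts.getD j 0)
    if pour_amount > 0 then
      let amounts := amounts.set i (amounts.getD i 0 - pour_amount)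
      let amounts := amounts.set j (amounts.getD j 0 + pour_amount)
      let new_state : JState := (amounts.getD 0 0, amounts.getD 1 0, amounts.getD 2 0)
      if isValid new_state then successors ++ [new_state] else successors
    else successors) []

-- check_goal_state compares against the MODULE-LEVEL goal_state = (1, 4, 3), not bfs's parameter.
def checkGoalState (state : JState) : Bool := state == (1, 4, 3)

-- Python's `while queue:` has no structural bound; ported with fuel (same computation, made
-- total). At most 217 distinct states are ever processed and each enqueues ≤ 6 successors,
-- so 10000 iterations are never exhausted on any input.
def bfsFuel : Nat := 10000

def bfsLoopA (fuel : Nat) (queue : List (JState × List JState)) (visited : PySem.Set JState) :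
    Option (List JState) :=
  match fuel with
  | 0 => none
  | fuel + 1 =>
    match queue with
    | [] => none
    | (state, path) :: rest =>
      if PySem.Set.contains visited state then bfsLoopA fuel rest visited
      else
        let visited := PySem.Set.add visited state
        let path := path ++ [state]
        if checkGoalState state then some path
        else
          bfsLoopA fuel
            ((getSuccessors state).foldl (fun queue successor => queue ++ [(successor, path)]) rest)
            visited

def bfs (start_state : Int × Int × Int) (goal_state : Int × Int × Int) :
    Option (List (Int × Int × Int)) :=
  bfsLoopA bfsFuel [(start_state, [])] PySem.Set.empty

-- ===== PORT B =====
-- Python's `while cur is not None` loop, ported with fuel; parent.get(cur) is Dict.getD cur none.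
-- Fuel parent.size + 1 covers every chain the loop follows (parent chains are acyclic, proved below).
def reconstructGo (fuel : Nat) (parent : PySem.Dict JState (Option JState)) (cur : Option JState)
    (path : List JState) : List JState :=
  match fuel with
  | 0 => path
  | fuel + 1 =>
    match cur with
    | none => path
    | some c => reconstructGo fuel parent (parent.getD c none) (path ++ [c])

def reconstruct (parent : PySem.Dict JState (Option JState)) (state : JState) : List JState :=
  (reconstructGo (parent.size + 1) parent (some state) []).reverse

def bfsLoopB (fuel : Nat) (queue : List JState) (visited : PySem.Set JState)
    (parent : PySem.Dict JState (Option JState)) : Option (List JState) :=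
  match fuel with
  | 0 => none
  | fuel + 1 =>
    match queue with
    | [] => none
    | state :: rest =>
      if PySem.Set.contains visited state then bfsLoopB fuel rest visited parent
      else
        let visited := PySem.Set.add visited state
        if checkGoalState state then some (reconstruct parent state)
        else
          let qp := (getSuccessors state).foldl
            (fun (acc : List JState × PySem.Dict JState (Option JState)) succ =>
              (acc.1 ++ [succ],
               if acc.2.contains succ then acc.2 else acc.2.insert succ (some state)))
            (rest, parent)
          bfsLoopB fuel qp.1 visited qp.2

def bfs_alt (start_state : Int × Int × Int) (goal_state : Int × Int × Int) :
    Option (List (Int × Int × Int)) :=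
  bfsLoopB bfsFuel [start_state] PySem.Set.empty (PySem.Dict.empty.insert start_state none)

-- ===== PRECONDITION & SPEC =====
def Spec_bfs (start_state : Int × Int × Int) (goal_state : Int × Int × Int) (out : Option (List (Int × Int × Int))) : Prop := out = bfs_alt start_state goal_state
instance (start_state : Int × Int × Int) (goal_state : Int × Int × Int) (out : Option (List (Int × Int × Int))) : Decidable (Spec_bfs start_state goal_state out) := by unfold Spec_bfs; infer_instance

-- ===== CLAIM (what is proved, stated in full; the proofs are below) =====
def Claim_equal_bfs : Prop := ∀ (start_state : Int × Int × Int) (goal_state : Int × Int × Int), Dom_bfs start_state goal_state → Spec_bfs start_state goal_state (bfs start_state goal_state)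

-- ===== LEMMAS AND PROOFS =====

-- `Builds par s l`: following parent pointers up from s yields the chain l (root first, s last).
inductive Builds (par : PySem.Dict JState (Option JState)) : JState → List JState → Prop
  | base {s : JState} : par.get? s = some none → Builds par s [s]
  | step {s t : JState} {l : List JState} :
      par.get? s = some (some t) → Builds par t l → Builds par s (l ++ [s])

def ChainOk (par : PySem.Dict JState (Option JState)) (s : JState) (p : List JState) : Prop :=
  Builds par s (p ++ [s]) ∧ (p ++ [s]).Nodup ∧ ∀ x ∈ p ++ [s], par.contains x = true

-- The simulation invariant between A's queue (with carried paths) and B's parent dict.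
def BfsInv (qA : List (JState × List JState)) (vis : PySem.Set JState)
    (par : PySem.Dict JState (Option JState)) : Prop :=
  par.keys.Nodup ∧
  (∀ k, par.contains k = true → k ∈ vis ∨ k ∈ qA.map Prod.fst) ∧
  (∀ i (h : i < qA.length), qA[i].1 ∉ vis →
    (∀ j (hj : j < qA.length), j < i → qA[j].1 ≠ qA[i].1) → ChainOk par qA[i].1 qA[i].2)

theorem contains_of_get?_some {d : PySem.Dict JState (Option JState)} {k : JState}
    {v : Option JState} (h : d.get? k = some v) : d.contains k = true := by
  cases h' : d.contains k
  · rw [← PySem.Dict.get?_eq_none_iff_contains] at h'; simp [h] at h'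
  · rfl

theorem builds_insert_fresh {d : PySem.Dict JState (Option JState)} {k : JState}
    {v : Option JState} (hk : d.contains k = false) {s : JState} {l : List JState}
    (hb : Builds d s l) : Builds (d.insert k v) s l := by
  induction hb with
  | base h =>
    refine Builds.base ?_
    rw [PySem.Dict.get?_insert_of_ne _ _ (fun he => ?_)]
    · exact h
    · rw [he] at h; rw [contains_of_get?_some h] at hk; cases hk
  | step h _ ih =>
    refine Builds.step ?_ ih
    rw [PySem.Dict.get?_insert_of_ne _ _ (fun he => ?_)]
    · exact h
    · rw [he] at h; rw [contains_of_get?_some h] at hk; cases hk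

-- The parent-updating fold of B's inner loop.
def parFold (state : JState) (succs : List JState) (d : PySem.Dict JState (Option JState)) :
    PySem.Dict JState (Option JState) :=
  succs.foldl (fun d succ => if d.contains succ then d else d.insert succ (some state)) d

theorem parFold_cons (state : JState) (h : JState) (t : List JState)
    (d : PySem.Dict JState (Option JState)) :
    parFold state (h :: t) d =
      parFold state t (if d.contains h then d else d.insert h (some state)) := rfl

theorem parFold_contains (state : JState) (succs : List JState)
    (d : PySem.Dict JState (Option JState)) (k : JState) :
    (parFold state succs d).contains k = true ↔ d.contains k = true ∨ k ∈ succs := by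
  induction succs generalizing d with
  | nil => simp [parFold]
  | cons h t ih =>
    rw [parFold_cons]
    by_cases hc : d.contains h = true
    · rw [if_pos hc, ih]
      constructor
      · rintro (h1 | h1)
        · exact Or.inl h1
        · exact Or.inr (List.mem_cons_of_mem _ h1)
      · rintro (h1 | h1)
        · exact Or.inl h1
        · rcases List.mem_cons.mp h1 with rfl | h2
          · exact Or.inl hc
          · exact Or.inr h2
    · rw [if_neg hc, ih, PySem.Dict.contains_insert]
      simp only [Bool.or_eq_true, beq_iff_eq, List.mem_cons]
      tauto

theorem parFold_keys_nodup (state : JState) (succs : List JState)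
    (d : PySem.Dict JState (Option JState)) (hd : d.keys.Nodup) :
    (parFold state succs d).keys.Nodup := by
  induction succs generalizing d with
  | nil => exact hd
  | cons h t ih =>
    rw [parFold_cons]
    split
    · exact ih d hd
    · exact ih _ (PySem.Dict.nodup_keys_insert _ _ _ hd)

theorem parFold_builds (state : JState) (succs : List JState)
    (d : PySem.Dict JState (Option JState)) {s : JState} {l : List JState}
    (hb : Builds d s l) : Builds (parFold state succs d) s l := by
  induction succs generalizing d with
  | nil => exact hb
  | cons h t ih =>
    rw [parFold_cons]
    split
    · exact ih d hb
    · next hc => exact ih _ (builds_insert_fresh (by simpa using hc) hb)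

theorem parFold_get?_preserved (state : JState) (succs : List JState)
    (d : PySem.Dict JState (Option JState)) (k : JState) (hk : d.contains k = true) :
    (parFold state succs d).get? k = d.get? k := by
  induction succs generalizing d with
  | nil => rfl
  | cons h t ih =>
    rw [parFold_cons]
    split
    · exact ih d hk
    · next hc =>
      have hne : k ≠ h := fun he => by rw [he] at hk; simp [hk] at hc
      rw [ih _ (by rw [PySem.Dict.contains_insert]; simp [hk])]
      exact PySem.Dict.get?_insert_of_ne _ _ hne

theorem parFold_get?_new (state : JState) (succs : List JState)
    (d : PySem.Dict JState (Option JState)) (k : JState) (hk : d.contains k = false)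
    (hmem : k ∈ succs) : (parFold state succs d).get? k = some (some state) := by
  induction succs generalizing d with
  | nil => cases hmem
  | cons h t ih =>
    rw [parFold_cons]
    by_cases he : h = k
    · subst he
      rw [if_neg (by simp [hk])]
      rw [parFold_get?_preserved _ _ _ _ (by rw [PySem.Dict.contains_insert]; simp)]
      exact PySem.Dict.get?_insert_self _ _ _
    · have hmem' : k ∈ t := by
        rcases List.mem_cons.mp hmem with rfl | h2
        · exact absurd rfl he
        · exact h2
      split
      · exact ih d hk hmem'
      · refine ih _ ?_ hmem'
        rw [PySem.Dict.contains_insert]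
        simp only [hk, Bool.or_false, beq_eq_false_iff_ne, ne_eq]
        exact fun h2 => he h2.symm

theorem reconstructGo_none (par : PySem.Dict JState (Option JState)) (fuel : Nat)
    (acc : List JState) : reconstructGo fuel par none acc = acc := by
  cases fuel <;> rfl

theorem reconstructGo_builds {par : PySem.Dict JState (Option JState)} {s : JState}
    {l : List JState} (hb : Builds par s l) :
    ∀ (acc : List JState) (fuel : Nat), l.length ≤ fuel →
      reconstructGo fuel par (some s) acc = acc ++ l.reverse := by
  induction hb with
  | base h =>
    intro acc fuel hf
    cases fuel with
    | zero => simp at hf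
    | succ f =>
      simp [reconstructGo, PySem.Dict.getD_eq_get?_getD, h, reconstructGo_none]
  | step h _ ih =>
    intro acc fuel hf
    cases fuel with
    | zero => simp at hf
    | succ f =>
      simp only [reconstructGo, PySem.Dict.getD_eq_get?_getD, h, Option.getD_some]
      rw [ih (acc ++ [_]) f (by simp at hf; omega)]
      simp

theorem nodup_subset_length {l l' : List JState} (h : l.Nodup) (hs : l ⊆ l') :
    l.length ≤ l'.length := by
  classical
  calc l.length = l.toFinset.card := (List.toFinset_card_of_nodup h).symm
    _ ≤ l'.toFinset.card := Finset.card_le_card (by intro x hx; simp at hx ⊢; exact hs hx)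
    _ ≤ l'.length := l'.toFinset_card_le

theorem size_eq_keys_length (d : PySem.Dict JState (Option JState)) :
    d.size = d.keys.length := by
  simp [PySem.Dict.size, PySem.Dict.keys]

theorem reconstruct_eq {par : PySem.Dict JState (Option JState)} {s : JState} {p : List JState}
    (hc : ChainOk par s p) : reconstruct par s = p ++ [s] := by
  obtain ⟨hb, hnd, hker⟩ := hc
  have hlen : (p ++ [s]).length ≤ par.size + 1 := by
    rw [size_eq_keys_length]
    have : (p ++ [s]).length ≤ par.keys.length := by
      refine nodup_subset_length hnd ?_
      intro x hx
      rw [← PySem.Dict.contains_iff_mem_keys]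
      exact hker x hx
    omega
  rw [reconstruct, reconstructGo_builds hb [] _ hlen]
  simp

theorem inv_skip {qA : List (JState × List JState)} {s : JState} {p : List JState}
    {vis : PySem.Set JState} {par : PySem.Dict JState (Option JState)}
    (hinv : BfsInv ((s, p) :: qA) vis par) (hs : s ∈ vis) : BfsInv qA vis par := by
  obtain ⟨h1, h2, h3⟩ := hinv
  refine ⟨h1, ?_, ?_⟩
  · intro k hk
    rcases h2 k hk with h | h
    · exact Or.inl h
    · rw [List.map_cons] at h
      rcases List.mem_cons.mp h with rfl | h
      · exact Or.inl hs
      · exact Or.inr h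
  · intro i hi hvis hfirst
    have := h3 (i + 1) (by simpa using Nat.succ_lt_succ hi) (by simpa using hvis) ?_
    · simpa using this
    · intro j hj hlt
      match j, hj, hlt with
      | 0, _, _ =>
        simp only [List.getElem_cons_zero, List.getElem_cons_succ]
        exact fun he => hvis (he ▸ hs)
      | j + 1, hj, hlt =>
        simp only [List.getElem_cons_succ]
        exact hfirst j (by simpa using Nat.lt_of_succ_lt_succ hj) (Nat.lt_of_succ_lt_succ hlt)

theorem inv_step {qA : List (JState × List JState)} {s : JState} {p : List JState}
    {vis : PySem.Set JState} {par : PySem.Dict JState (Option JState)}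
    (hinv : BfsInv ((s, p) :: qA) vis par) (hs : s ∉ vis) :
    BfsInv (qA ++ (getSuccessors s).map (fun t => (t, p ++ [s]))) (vis ++ [s])
      (parFold s (getSuccessors s) par) := by
  obtain ⟨h1, h2, h3⟩ := hinv
  have hch : ChainOk par s p := by
    simpa using h3 0 (by simp) (by simpa using hs) (by omega)
  obtain ⟨hbs, hnds, hkers⟩ := hch
  refine ⟨parFold_keys_nodup _ _ _ h1, ?_, ?_⟩
  · intro k hk
    rcases (parFold_contains s (getSuccessors s) par k).mp hk with hk | hk
    · rcases h2 k hk with hv | hv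
      · exact Or.inl (by simp [hv])
      · rw [List.map_cons] at hv
        rcases List.mem_cons.mp hv with rfl | hv
        · exact Or.inl (by simp)
        · exact Or.inr (by rw [List.map_append]; exact List.mem_append_left _ hv)
    · refine Or.inr ?_
      rw [List.map_append, List.map_map,
        show (Prod.fst ∘ fun t : JState => (t, p ++ [s])) = (fun a => a) from rfl, List.map_id']
      exact List.mem_append_right _ hk
  · intro i hi hvis hfirst
    by_cases hlt : i < qA.length
    · -- an entry carried over from the old queue
      have hget : (qA ++ (getSuccessors s).map (fun t => (t, p ++ [s])))[i]'hi = qA[i]'hlt :=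
        List.getElem_append_left hlt
      rw [hget] at hvis ⊢
      have hvis1 : qA[i].1 ∉ vis := fun h => hvis (List.mem_append_left _ h)
      have hvis2 : qA[i].1 ≠ s := fun h => hvis (List.mem_append_right _ (by simp [h]))
      have hco := h3 (i + 1) (by simpa using Nat.succ_lt_succ hlt)
        (by simpa using hvis1) ?_
      · simp only [List.getElem_cons_succ] at hco
        obtain ⟨hb, hnd, hker⟩ := hco
        refine ⟨parFold_builds _ _ _ hb, hnd, ?_⟩
        intro x hx
        exact (parFold_contains _ _ _ _).mpr (Or.inl (hker x hx))
      · intro j hj hjlt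
        match j, hj, hjlt with
        | 0, _, _ =>
          simp only [List.getElem_cons_zero, List.getElem_cons_succ]
          exact fun h => hvis2 h.symm
        | j + 1, hj, hjlt =>
          simp only [List.getElem_cons_succ]
          have hj' : j < qA.length := by simpa using Nat.lt_of_succ_lt_succ hj
          have := hfirst j (by rw [List.length_append]; omega) (by omega)
          rwa [List.getElem_append_left hj', hget] at this
    · -- a freshly enqueued successor
      have hlen : i - qA.length < ((getSuccessors s).map (fun t => (t, p ++ [s]))).length := by
        rw [List.length_append] at hi; omega
      have hm : i - qA.length < (getSuccessors s).length := by simpa using hlen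
      have hget : (qA ++ (getSuccessors s).map (fun t => (t, p ++ [s])))[i]'hi =
          ((getSuccessors s)[i - qA.length]'hm, p ++ [s]) := by
        rw [List.getElem_append_right (by omega), List.getElem_map]
      rw [hget] at hvis ⊢
      simp only at hvis ⊢
      have hvis1 : (getSuccessors s)[i - qA.length]'hm ∉ vis :=
        fun h => hvis (List.mem_append_left _ h)
      have hvis2 : (getSuccessors s)[i - qA.length]'hm ≠ s :=
        fun h => hvis (List.mem_append_right _ (by simp [h]))
      have hnotc : par.contains ((getSuccessors s)[i - qA.length]'hm) = false := by
        cases hcc : par.contains ((getSuccessors s)[i - qA.length]'hm) with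
        | false => rfl
        | true =>
          exfalso
          rcases h2 _ hcc with hv | hv
          · exact hvis1 hv
          · rw [List.map_cons] at hv
            rcases List.mem_cons.mp hv with he | hv
            · exact hvis2 he
            · obtain ⟨⟨a, b⟩, hab, he⟩ := List.mem_map.mp hv
              obtain ⟨j, hj, hje⟩ := List.mem_iff_getElem.mp hab
              have := hfirst j (by rw [List.length_append]; omega) (by omega)
              rw [List.getElem_append_left hj, hget] at this
              simp only at this
              exact this (by rw [hje]; simpa using he)
      refine ⟨?_, ?_, ?_⟩
      · refine Builds.step ?_ (parFold_builds _ _ _ hbs)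
        exact parFold_get?_new _ _ _ _ hnotc (List.getElem_mem hm)
      · rw [List.nodup_append]
        refine ⟨hnds, by simp, ?_⟩
        intro a ha b hb he
        rw [List.mem_singleton] at hb
        subst hb
        rw [← he] at hnotc
        rw [hkers a ha] at hnotc
        cases hnotc
      · intro x hx
        rcases List.mem_append.mp hx with hx | hx
        · exact (parFold_contains _ _ _ _).mpr (Or.inl (hkers x hx))
        · refine (parFold_contains _ _ _ _).mpr (Or.inr ?_)
          rw [List.mem_singleton.mp hx]
          exact List.getElem_mem hm

theorem loopAB : ∀ (fuel : Nat) (qA : List (JState × List JState)) (vis : PySem.Set JState)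
    (par : PySem.Dict JState (Option JState)), BfsInv qA vis par →
    bfsLoopA fuel qA vis = bfsLoopB fuel (qA.map Prod.fst) vis par := by
  intro fuel
  induction fuel with
  | zero => intro qA vis par _; rfl
  | succ n ih =>
    intro qA vis par hinv
    match qA with
    | [] => rfl
    | (s, p) :: rest =>
      simp only [bfsLoopA, bfsLoopB, List.map_cons]
      by_cases hc : PySem.Set.contains vis s = true
      · rw [if_pos hc, if_pos hc]
        exact ih rest vis par (inv_skip hinv ((PySem.Set.contains_iff vis s).mp hc))
      · have hsnot : s ∉ vis := fun h => hc ((PySem.Set.contains_iff vis s).mpr h)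
        rw [if_neg hc, if_neg hc]
        by_cases hg : checkGoalState s = true
        · rw [if_pos hg, if_pos hg]
          have hch : ChainOk par s p := by
            obtain ⟨_, _, h3⟩ := hinv
            simpa using h3 0 (by simp) (by simpa using hsnot) (by omega)
          rw [reconstruct_eq hch]
        · rw [if_neg hg, if_neg hg]
          rw [PySem.List.foldl_prod_mk
            (f := fun (q : List JState) succ => q ++ [succ])
            (g := fun (d : PySem.Dict JState (Option JState)) succ =>
              if d.contains succ then d else d.insert succ (some s))]
          simp only
          rw [PySem.List.foldl_append_singleton_eq_map (fun succ => (succ, p ++ [s])),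
              PySem.List.foldl_append_singleton_eq_self]
          have := ih (rest ++ (getSuccessors s).map (fun t => (t, p ++ [s])))
            (vis ++ [s]) (parFold s (getSuccessors s) par) (inv_step hinv hsnot)
          rw [PySem.Set.add_of_not_mem hsnot]
          rw [this]
          simp only [List.map_append, List.map_map]
          rw [show (Prod.fst ∘ fun t : JState => (t, p ++ [s])) = (fun a => a) from rfl,
              List.map_id']
          rfl

-- ===== VERDICT (by name: the statement is the Claim_ definition above) =====
theorem bfs_spec : Claim_equal_bfs := by
  intro start goal _
  unfold Spec_bfs bfs bfs_alt
  rw [loopAB bfsFuel [(start, [])] PySem.Set.empty (PySem.Dict.empty.insert start none) ?_]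
  · rfl
  · refine ⟨PySem.Dict.nodup_keys_insert _ _ _ PySem.Dict.nodup_keys_empty, ?_, ?_⟩
    · intro k hk
      rw [PySem.Dict.contains_insert] at hk
      simp at hk
      simp [hk]
    · intro i hi _ _
      match i, hi with
      | 0, _ =>
        refine ⟨Builds.base (PySem.Dict.get?_insert_self _ _ _), by simp, ?_⟩
        intro x hx
        simp at hx
        subst hx
        rw [PySem.Dict.contains_insert]
        simp
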